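-- pv_equiv track=rewrite | github.com/djaballah/SearchEngine | document.py | _construct_index
-- ===== SOURCE A (Python) =====
-- import collections
--
-- def _construct_index(stem_list):
--     """
--     Return an index of stems in list
--     :param stem_list: list of stems
--     :type list
--     :return: index of stems
--     :type dict
--     """
--     assert isinstance(stem_list, list)
--     key_set = set(key for key in "0123456789abcdefghijklmnopqrstuvwxyz")
--     d = {key: [] for key in key_set}
--     index = collections.OrderedDict(sorted(d.items(), key=lambda t: t[0]))
--     for stem in stem_list:
--         first_caracter = stem[0]
--         if first_caracter in key_set:
--             index[first_caracter].append(stem)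
--     return index
-- ===== SOURCE B (Python) =====
-- import collections
--
-- def _construct_index(stem_list):
--     assert isinstance(stem_list, list)
--     keys = "0123456789abcdefghijklmnopqrstuvwxyz"
--     return collections.OrderedDict(
--         (k, [s for s in stem_list if s[0] == k]) for k in keys)
-- ===== Notes on version B (the rewrite author's own statement) =====
-- stated objective: simpler
-- what changed: Replaces A's set/dict-comprehension/sort setup and single dispatching fold over the stems by a direct map over the 36 sorted key characters, building each bucket as a filtered scan of the stem list.
import Mathlib
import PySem

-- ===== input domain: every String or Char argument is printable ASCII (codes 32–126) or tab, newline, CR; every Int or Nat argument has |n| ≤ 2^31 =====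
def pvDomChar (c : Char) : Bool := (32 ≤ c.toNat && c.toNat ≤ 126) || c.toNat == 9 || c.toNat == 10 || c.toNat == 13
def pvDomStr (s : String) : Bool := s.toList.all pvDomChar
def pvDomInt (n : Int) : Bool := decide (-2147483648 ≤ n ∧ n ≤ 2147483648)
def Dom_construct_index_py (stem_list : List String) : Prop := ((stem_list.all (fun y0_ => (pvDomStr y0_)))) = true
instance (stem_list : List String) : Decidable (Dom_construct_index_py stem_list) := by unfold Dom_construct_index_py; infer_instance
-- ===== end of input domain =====

-- B replaces A's set/dict/sort setup and dispatching fold by a map over the 36 sorted keys with a per-key filter (simpler, not faster).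


-- ===== PORT A =====
def construct_index_py (stem_list : List String) : List (String × List String) :=
  -- key_set = set(key for key in "0123456789abcdefghijklmnopqrstuvwxyz")  (keys are 1-char strings)
  let key_set : PySem.Set String :=
    PySem.Set.ofList (("0123456789abcdefghijklmnopqrstuvwxyz".toList).map String.singleton)
  -- d = {key: [] for key in key_set}
  let d : PySem.Dict String (List String) :=
    PySem.Dict.ofList (key_set.map (fun k => (k, ([] : List String))))
  -- index = collections.OrderedDict(sorted(d.items(), key=lambda t: t[0]))
  let index : PySem.Dict String (List String) :=
    PySem.Dict.mk (PySem.List.sorted d.items (fun t => t.1) false)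
  -- for stem in stem_list: first = stem[0]; if first in key_set: index[first].append(stem)
  let final := stem_list.foldl (fun ix stem =>
    match PySem.Str.pyGet? stem 0 with
    | none => ix  -- Python raises IndexError here (empty stem); excluded by Pre_
    | some c =>
      if PySem.Set.contains key_set (String.singleton c) then
        -- index[first].append(stem): the key is present, so lookup+append = modify with default []
        ix.modify (String.singleton c) [] (fun l => l ++ [stem])
      else ix) index
  final.items

-- ===== PORT B =====
def construct_index_py_alt (stem_list : List String) : List (String × List String) :=
  ("0123456789abcdefghijklmnopqrstuvwxyz".toList).map (fun k =>
    (String.singleton k, stem_list.filter (fun s => PySem.Str.pyGet? s 0 == some k)))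

-- ===== PRECONDITION & SPEC =====
-- Pre_ excludes lists containing the empty string, on which both Pythons raise IndexError (stem[0]).
def Pre_construct_index_py (stem_list : List String) : Prop := "" ∉ stem_list
instance (stem_list : List String) : Decidable (Pre_construct_index_py stem_list) := by unfold Pre_construct_index_py; infer_instance
def pvWitness_construct_index_py : List String := ["apple", "3d", "ape", "!x"]

def Spec_construct_index_py (stem_list : List String) (out : List (String × List String)) : Prop := out = construct_index_py_alt stem_list
instance (stem_list : List String) (out : List (String × List String)) : Decidable (Spec_construct_index_py stem_list out) := by unfold Spec_construct_index_py; infer_instance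

-- ===== CLAIM (what is proved, stated in full; the proofs are below) =====
def Claim_equal_construct_index_py : Prop := ∀ (stem_list : List String), Dom_construct_index_py stem_list → Pre_construct_index_py stem_list → Spec_construct_index_py stem_list (construct_index_py stem_list)

-- ===== LEMMAS AND PROOFS =====

-- proof-side names for the pieces of port A
def pvKC : List Char := "0123456789abcdefghijklmnopqrstuvwxyz".toList
def pvSK : List String := pvKC.map String.singleton
def pvSKP : List (String × List String) := pvSK.map (fun k => (k, ([] : List String)))
def pvKS : PySem.Set String := PySem.Set.ofList pvSK
def pvStep (ix : PySem.Dict String (List String)) (stem : String) : PySem.Dict String (List String) :=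
  match PySem.Str.pyGet? stem 0 with
  | none => ix
  | some c =>
    if PySem.Set.contains pvKS (String.singleton c) then
      ix.modify (String.singleton c) [] (fun l => l ++ [stem])
    else ix
def pvIdx0 : PySem.Dict String (List String) :=
  PySem.Dict.mk (PySem.List.sorted (PySem.Dict.ofList (pvKS.map (fun k => (k, ([] : List String))))).items (fun t => t.1) false)

theorem pvSingleton_inj {a b : Char} (h : String.singleton a = String.singleton b) : a = b := by
  have := congrArg String.toList h
  simpa using this

theorem pvSingleton_lt {a b : Char} (h : a < b) : String.singleton a < String.singleton b := by
  rw [String.lt_iff_toList_lt]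
  simp only [String.toList_singleton]
  exact (List.lt_iff_lex_lt _ _).mpr (List.Lex.rel h)

theorem pvKC_nodup : pvKC.Nodup := by decide

theorem pvKC_pairwise : pvKC.Pairwise (· < ·) := by decide

theorem pvSK_nodup : pvSK.Nodup :=
  pvKC_nodup.map (fun _ _ h => pvSingleton_inj h)

theorem pvKS_eq : pvKS = pvSK := PySem.Set.ofList_eq_self_of_nodup pvSK pvSK_nodup

theorem pvMem_singleton_SK {c : Char} : String.singleton c ∈ pvSK ↔ c ∈ pvKC := by
  constructor
  · intro h
    obtain ⟨a, ha, he⟩ := List.mem_map.mp h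
    exact (pvSingleton_inj he) ▸ ha
  · intro h
    exact List.mem_map.mpr ⟨c, h, rfl⟩

theorem pvSKP_pairwise : pvSKP.Pairwise (fun p q => p.1 < q.1) := by
  simp only [pvSKP, pvSK, List.map_map, List.pairwise_map, Function.comp]
  exact pvKC_pairwise.imp (fun h => pvSingleton_lt h)

theorem pvD_items :
    (PySem.Dict.ofList (pvKS.map (fun k => (k, ([] : List String))))).items = pvSKP := by
  rw [pvKS_eq]
  show (PySem.Dict.ofList pvSKP).items = pvSKP
  unfold PySem.Dict.ofList PySem.Dict.update
  simpa [PySem.Dict.empty] using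
    PySem.Dict.items_foldl_insert_fresh pvSKP (fun p => p.1) (fun p => p.2) PySem.Dict.empty
      (by simp) (by simpa [pvSKP, List.map_map, Function.comp] using pvSK_nodup)

theorem pvIdx0_eq : pvIdx0 = PySem.Dict.mk pvSKP := by
  unfold pvIdx0
  rw [pvD_items]
  congr 1
  exact PySem.List.sorted_eq_of_perm_of_pairwise_lt pvSKP pvSKP (fun t => t.1)
    (List.Perm.refl _) pvSKP_pairwise

theorem pvIdx0_keys : pvIdx0.keys = pvSK := by
  rw [pvIdx0_eq]
  show pvSKP.map (fun x => x.1) = pvSK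
  unfold pvSKP
  rw [List.map_map]
  show pvSK.map (fun k => k) = pvSK
  simp

theorem pvIdx0_getD (c : Char) (hc : c ∈ pvKC) : pvIdx0.getD (String.singleton c) [] = [] := by
  have hitems : pvIdx0.items = pvSKP := by rw [pvIdx0_eq]
  have hmem : (String.singleton c, ([] : List String)) ∈ pvIdx0.items := by
    rw [hitems]
    simp only [pvSKP, pvSK, List.map_map, List.mem_map, Function.comp]
    exact ⟨c, hc, rfl⟩
  exact PySem.Dict.getD_of_mem_items pvIdx0 hmem (pvIdx0_keys ▸ pvSK_nodup) []

theorem pvLoop (l : List String) (d : PySem.Dict String (List String))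
    (hl : ∀ s ∈ l, s ≠ "") (hk : d.keys = pvSK) :
    (List.foldl pvStep d l).keys = pvSK ∧
    ∀ c ∈ pvKC, (List.foldl pvStep d l).getD (String.singleton c) [] =
      d.getD (String.singleton c) [] ++ l.filter (fun s => PySem.Str.pyGet? s 0 == some c) := by
  induction l generalizing d with
  | nil =>
    refine ⟨hk, ?_⟩
    intro c _
    simp
  | cons s l ih =>
    have hs : s ≠ "" := hl s (by simp)
    have hl' : ∀ t ∈ l, t ≠ "" := fun t ht => hl t (by simp [ht])
    obtain ⟨c₀, cs, hcs⟩ : ∃ c₀ cs, s.toList = c₀ :: cs := by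
      cases h : s.toList with
      | nil => exact absurd h (by simpa using hs)
      | cons a t => exact ⟨a, t, rfl⟩
    have hget : PySem.Str.pyGet? s 0 = some c₀ := by
      simp [PySem.Str.pyGet?, hcs, PySem.Chars.pyGet?_eq_listPyGet?]
    have hget' : PySem.List.pyGet? s.toList 0 = some c₀ := by
      simp [hcs]
    by_cases hc₀ : c₀ ∈ pvKC
    · have hmem : String.singleton c₀ ∈ pvKS := by
        rw [pvKS_eq]
        exact pvMem_singleton_SK.mpr hc₀
      have hstep : pvStep d s = d.modify (String.singleton c₀) [] (fun l => l ++ [s]) := by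
        simp [pvStep, hget', hmem]
      have hdc : d.contains (String.singleton c₀) = true :=
        (PySem.Dict.contains_iff_mem_keys d _).mpr (by rw [hk]; exact pvMem_singleton_SK.mpr hc₀)
      have hdk : (d.modify (String.singleton c₀) [] (fun l => l ++ [s])).keys = pvSK := by
        rw [PySem.Dict.keys_modify, PySem.Dict.keys_insert_of_contains _ _ hdc, hk]
      obtain ⟨ihk, ihg⟩ := ih _ hl' hdk
      refine ⟨by rw [List.foldl_cons, hstep]; exact ihk, ?_⟩
      intro c hc
      rw [List.foldl_cons, hstep, ihg c hc, PySem.Dict.getD_modify, List.filter_cons]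
      by_cases hcc : c = c₀
      · subst hcc
        rw [if_pos rfl]
        have hp : (PySem.Str.pyGet? s 0 == some c) = true := by rw [hget]; simp
        rw [hp]
        simp
      · rw [if_neg (fun h => hcc (pvSingleton_inj h))]
        have hp : (PySem.Str.pyGet? s 0 == some c) = false := by
          rw [hget]
          have hne : c₀ ≠ c := fun h => hcc h.symm
          simp [hne]
        rw [hp]
        simp
    · have hnmem : String.singleton c₀ ∉ pvKS := by
        rw [pvKS_eq]
        exact fun h => hc₀ (pvMem_singleton_SK.mp h)
      have hstep : pvStep d s = d := by
        simp [pvStep, hget', hnmem]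
      obtain ⟨ihk, ihg⟩ := ih d hl' hk
      refine ⟨by rw [List.foldl_cons, hstep]; exact ihk, ?_⟩
      intro c hc
      rw [List.foldl_cons, hstep, ihg c hc, List.filter_cons]
      have hp : (PySem.Str.pyGet? s 0 == some c) = false := by
        rw [hget]
        have hne : c₀ ≠ c := fun h => hc₀ (h ▸ hc)
        simp [hne]
      rw [hp]
      simp

-- ===== VERDICT (by name: the statement is the Claim_ definition above) =====
theorem construct_index_py_spec : Claim_equal_construct_index_py := by
  intro stem_list _hdom hpre
  unfold Spec_construct_index_py
  have hl : ∀ s ∈ stem_list, s ≠ "" := fun s hs h => hpre (h ▸ hs)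
  have h := pvLoop stem_list pvIdx0 hl pvIdx0_keys
  have h1 : construct_index_py stem_list = (List.foldl pvStep pvIdx0 stem_list).items := rfl
  rw [h1, PySem.Dict.items_eq_map_keys _ (h.1 ▸ pvSK_nodup) ([] : List String), h.1]
  show (pvKC.map String.singleton).map _ = _
  rw [List.map_map]
  apply List.map_congr_left
  intro c hc
  simp only [Function.comp]
  rw [h.2 c hc, pvIdx0_getD c hc, List.nil_append]
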